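-- pv_equiv track=rewrite | github.com/slovb/advent_of_code_2019 | 08/first.py | solve
-- ===== SOURCE A (Python) =====
-- def count(n, size, character, data):
--     c = 0
--     for i in data[n*size:(n+1)*size]:
--         if i == character:
--             c += 1
--     return c
--
-- def solve(data):
--     width = 25
--     height = 6
--     size = width * height
--     nLayers = len(data) // size
--     leastC = 150
--     leastN = -1
--     for n in range(nLayers):
--         c = count(n, size, 0, data)
--         if c < leastC:
--             leastC = c
--             leastN = n
--     return count(leastN, size, 1, data) * count(leastN, size, 2, data)
-- ===== SOURCE B (Python) =====
-- def solve(data):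
--     size = 150
--     zeros = ones = twos = filled = 0
--     best_zeros, best_product = size, 0
--     for pixel in data:
--         if pixel == 0:
--             zeros += 1
--         elif pixel == 1:
--             ones += 1
--         elif pixel == 2:
--             twos += 1
--         filled += 1
--         if filled == size:
--             if zeros < best_zeros:
--                 best_zeros, best_product = zeros, ones * twos
--             zeros = ones = twos = filled = 0
--     return best_product
-- ===== Notes on version B (the rewrite author's own statement) =====
-- stated objective: alternative
-- what changed: B is a single streaming pass over the pixels with running zero/one/two counters and a layer-position counter: it folds the zero-count minimisation and the 1*2 product into the same pass at each layer boundary (trailing partial layer never completes, so it is dropped), whereas A slices the data per layer and re-scans the winning layer twice at the end.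
import Mathlib
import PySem

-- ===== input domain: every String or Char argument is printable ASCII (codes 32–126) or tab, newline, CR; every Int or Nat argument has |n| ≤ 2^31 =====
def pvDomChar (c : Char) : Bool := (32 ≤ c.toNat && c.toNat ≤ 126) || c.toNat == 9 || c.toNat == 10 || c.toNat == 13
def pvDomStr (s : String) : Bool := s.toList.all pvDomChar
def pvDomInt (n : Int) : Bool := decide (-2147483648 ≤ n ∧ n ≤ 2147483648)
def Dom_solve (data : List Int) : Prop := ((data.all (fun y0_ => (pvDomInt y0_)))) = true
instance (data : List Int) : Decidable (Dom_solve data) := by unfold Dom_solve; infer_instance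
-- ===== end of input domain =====

-- B replaces A's per-layer slice-and-count (plus two final re-scans of the winning layer) by one
-- streaming pass over the pixels with running zero/one/two counters updated at each layer boundary (alternative decomposition).


-- ===== PORT A =====
def count (n size character : Int) (data : List Int) : Int :=
  (PySem.List.slice data (some (n * size)) (some ((n + 1) * size))).foldl
    (fun c i => if i == character then c + 1 else c) 0

def solve (data : List Int) : Int :=
  let width : Int := 25
  let height : Int := 6
  let size : Int := width * height
  let nLayers : Int := PySem.Int.floordiv (data.length : Int) size
  let st : Int × Int := (PySem.List.pyRange 0 nLayers 1).foldl
    (fun (st : Int × Int) n =>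
      let c := count n size 0 data
      if c < st.1 then (c, n) else st)
    (150, -1)
  count st.2 size 1 data * count st.2 size 2 data

-- ===== PORT B =====
def solve_alt (data : List Int) : Int :=
  let size : Int := 150
  let st : Int × Int × Int × Int × Int × Int := data.foldl
    (fun (s : Int × Int × Int × Int × Int × Int) pixel =>
      let z := s.1; let o := s.2.1; let t := s.2.2.1
      let f := s.2.2.2.1; let bz := s.2.2.2.2.1; let bp := s.2.2.2.2.2
      let zot : Int × Int × Int :=
        if pixel == 0 then (z + 1, o, t)
        else if pixel == 1 then (z, o + 1, t)
        else if pixel == 2 then (z, o, t + 1)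
        else (z, o, t)
      let f := f + 1
      if f == size then
        (if zot.1 < bz then (0, 0, 0, 0, zot.1, zot.2.1 * zot.2.2)
         else (0, 0, 0, 0, bz, bp))
      else (zot.1, zot.2.1, zot.2.2, f, bz, bp))
    (0, 0, 0, 0, size, 0)
  st.2.2.2.2.2

-- ===== PRECONDITION & SPEC =====
def Spec_solve (data : List Int) (out : Int) : Prop := out = solve_alt data
instance (data : List Int) (out : Int) : Decidable (Spec_solve data out) := by unfold Spec_solve; infer_instance

-- ===== CLAIM (what is proved, stated in full; the proofs are below) =====
def Claim_equal_solve : Prop := ∀ (data : List Int), Dom_solve data → Spec_solve data (solve data)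

-- ===== LEMMAS AND PROOFS =====

-- the m-th complete layer (Nat index)
def layer (data : List Int) (m : Nat) : List Int := (data.drop (m * 150)).take 150

-- count of character ch in the m-th layer, as Int
def zc (data : List Int) (m : Nat) (ch : Int) : Int := ((layer data m).count ch : Int)

lemma count_natCast (data : List Int) (m : Nat) (ch : Int) :
    count (m : Int) 150 ch data = zc data m ch := by
  have hs : PySem.List.slice data (some ((m : Int) * 150)) (some (((m : Int) + 1) * 150))
      = layer data m := by
    have h1 : ((m : Int) * 150) = ((m * 150 : Nat) : Int) := by push_cast; ring
    have h2 : (((m : Int) + 1) * 150) = ((m * 150 : Nat) : Int) + ((150 : Nat) : Int) := by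
      push_cast; ring
    rw [h1, h2, PySem.List.slice_natCast_add]
    rfl
  unfold count zc
  rw [hs]
  have := PySem.List.foldl_count_if (fun i => i == ch) (layer data m) 0
  simpa [List.count] using this

lemma count_neg_one (data : List Int) (ch : Int) : count (-1) 150 ch data = 0 := by
  unfold count
  have h : PySem.List.slice data (some ((-1 : Int) * 150)) (some (((-1 : Int) + 1) * 150)) = [] := by
    have h0 : (((-1 : Int) + 1) * 150) = ((0 : Nat) : Int) := by norm_num
    rw [show ((-1 : Int) * 150) = (-150 : Int) by norm_num, h0]
    simp [PySem.List.slice, PySem.List.clampIdx]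
  rw [h]
  rfl

-- A's loop step and range-indexed fold state
def stepA (data : List Int) (st : Int × Int) (n : Int) : Int × Int :=
  if count n 150 0 data < st.1 then (count n 150 0 data, n) else st

def foldA (data : List Int) (k : Nat) : Int × Int :=
  (List.range k).foldl (fun st (j : Nat) => stepA data st (j : Int)) (150, -1)

lemma floordiv_len (data : List Int) :
    PySem.Int.floordiv ((data.length : Int)) 150 = ((data.length / 150 : Nat) : Int) := by
  exact_mod_cast PySem.Int.floordiv_natCast data.length 150

lemma solveA_loop (data : List Int) :
    (PySem.List.pyRange 0 ((data.length / 150 : Nat) : Int) 1).foldl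
      (fun (st : Int × Int) n =>
        if count n 150 0 data < st.1 then (count n 150 0 data, n) else st) (150, -1)
      = foldA data (data.length / 150) := by
  rw [PySem.List.pyRange_one, List.foldl_map]
  have h : ((((data.length / 150 : Nat) : Int)) - 0).toNat = data.length / 150 := by omega
  rw [h]
  simp only [zero_add]
  rfl

lemma solveA_eq (data : List Int) :
    solve data = count (foldA data (data.length / 150)).2 150 1 data *
      count (foldA data (data.length / 150)).2 150 2 data := by
  have hsize : (25 : Int) * 6 = 150 := by norm_num
  simp only [solve, hsize, floordiv_len]
  rw [solveA_loop]

-- B's loop step (named copy of the lambda in solve_alt)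
def stepB (s : Int × Int × Int × Int × Int × Int) (pixel : Int) :
    Int × Int × Int × Int × Int × Int :=
  let z := s.1; let o := s.2.1; let t := s.2.2.1
  let f := s.2.2.2.1; let bz := s.2.2.2.2.1; let bp := s.2.2.2.2.2
  let zot : Int × Int × Int :=
    if pixel == 0 then (z + 1, o, t)
    else if pixel == 1 then (z, o + 1, t)
    else if pixel == 2 then (z, o, t + 1)
    else (z, o, t)
  let f := f + 1
  if f == 150 then
    (if zot.1 < bz then (0, 0, 0, 0, zot.1, zot.2.1 * zot.2.2)
     else (0, 0, 0, 0, bz, bp))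
  else (zot.1, zot.2.1, zot.2.2, f, bz, bp)

lemma solve_alt_eq (data : List Int) :
    solve_alt data = (data.foldl stepB (0, 0, 0, 0, 150, 0)).2.2.2.2.2 := rfl

-- per-pixel increments
def d0 (x : Int) : Int := if x = 0 then 1 else 0
def d1 (x : Int) : Int := if x = 1 then 1 else 0
def d2 (x : Int) : Int := if x = 2 then 1 else 0

lemma stepB_mid (z o t bz bp : Int) (fn : Nat) (x : Int) (h : fn + 1 ≠ 150) :
    stepB (z, o, t, (fn : Int), bz, bp) x =
      (z + d0 x, o + d1 x, t + d2 x, ((fn + 1 : Nat) : Int), bz, bp) := by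
  have hne : ¬ (((fn : Int) + 1) = 150) := by
    intro hc; apply h; exact_mod_cast hc
  by_cases hx0 : x = 0 <;> by_cases hx1 : x = 1 <;> by_cases hx2 : x = 2 <;>
    simp_all [stepB, d0, d1, d2]

lemma stepB_end (z o t bz bp : Int) (x : Int) :
    stepB (z, o, t, ((149 : Nat) : Int), bz, bp) x =
      (if z + d0 x < bz then (0, 0, 0, 0, z + d0 x, (o + d1 x) * (t + d2 x))
       else (0, 0, 0, 0, bz, bp)) := by
  by_cases hx0 : x = 0 <;> by_cases hx1 : x = 1 <;> by_cases hx2 : x = 2 <;>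
    simp_all [stepB, d0, d1, d2]

lemma count_cons_int (x : Int) (xs : List Int) (c : Int) :
    (((x :: xs).count c : Nat) : Int) = ((xs.count c : Nat) : Int) + (if x = c then 1 else 0) := by
  by_cases hx : x = c <;> simp [hx]

-- a complete layer, started mid-count: both counters accumulate and the boundary fires
lemma fold_chunk (l : List Int) : ∀ (z o t bz bp : Int) (fn : Nat),
    l ≠ [] → l.length + fn = 150 →
    l.foldl stepB (z, o, t, (fn : Int), bz, bp) =
      (if z + (l.count 0 : Int) < bz
       then (0, 0, 0, 0, z + (l.count 0 : Int),
         (o + (l.count 1 : Int)) * (t + (l.count 2 : Int)))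
       else (0, 0, 0, 0, bz, bp)) := by
  induction l with
  | nil => intro _ _ _ _ _ _ hne _; exact absurd rfl hne
  | cons x xs ih =>
    intro z o t bz bp fn _ hlen
    by_cases hxs : xs = []
    · subst hxs
      have hfn : fn = 149 := by simp at hlen; omega
      subst hfn
      rw [List.foldl_cons, stepB_end, List.foldl_nil]
      simp [d0, d1, d2, count_cons_int]
    · have hne1 : fn + 1 ≠ 150 := by
        have : 1 ≤ xs.length := List.length_pos_of_ne_nil hxs
        simp at hlen; omega
      rw [List.foldl_cons, stepB_mid _ _ _ _ _ _ _ hne1,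
        ih _ _ _ _ _ (fn + 1) hxs (by simp at hlen ⊢; omega)]
      have e0 : z + d0 x + (xs.count 0 : Int) = z + ((x :: xs).count 0 : Int) := by
        rw [count_cons_int]; unfold d0; ring
      have e1 : o + d1 x + (xs.count 1 : Int) = o + ((x :: xs).count 1 : Int) := by
        rw [count_cons_int]; unfold d1; ring
      have e2 : t + d2 x + (xs.count 2 : Int) = t + ((x :: xs).count 2 : Int) := by
        rw [count_cons_int]; unfold d2; ring
      rw [e0, e1, e2]

-- a trailing partial layer never reaches the boundary: best pair unchanged
lemma fold_partial (l : List Int) : ∀ (z o t bz bp : Int) (fn : Nat),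
    l.length + fn < 150 →
    (l.foldl stepB (z, o, t, (fn : Int), bz, bp)).2.2.2.2 = (bz, bp) := by
  induction l with
  | nil => intro _ _ _ _ _ _ _; rfl
  | cons x xs ih =>
    intro z o t bz bp fn hlen
    have hne1 : fn + 1 ≠ 150 := by simp at hlen; omega
    rw [List.foldl_cons, stepB_mid _ _ _ _ _ _ _ hne1]
    exact ih _ _ _ _ _ (fn + 1) (by simp at hlen; omega)

-- per-layer best update (B's boundary action, in terms of layer counts)
def updB (b : Int × Int) (l : List Int) : Int × Int :=
  if (l.count 0 : Int) < b.1 then ((l.count 0 : Int), (l.count 1 : Int) * (l.count 2 : Int)) else b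

lemma layer_zero (data : List Int) (h : 150 ≤ data.length) : layer data 0 = data.take 150 := by
  simp [layer]

lemma layer_drop (data : List Int) (m : Nat) :
    layer (data.drop 150) m = layer data (m + 1) := by
  simp [layer, List.drop_drop]
  ring_nf

-- B's streaming fold computes A's per-layer best fold over the complete layers
lemma fold_data : ∀ (k : Nat) (data : List Int) (bz bp : Int), data.length / 150 = k →
    (data.foldl stepB (0, 0, 0, 0, bz, bp)).2.2.2.2 =
      (List.range k).foldl (fun b m => updB b (layer data m)) (bz, bp) := by
  intro k
  induction k with
  | zero =>
    intro data bz bp hk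
    have hlen : data.length < 150 := by omega
    rw [List.range_zero, List.foldl_nil]
    have h := fold_partial data 0 0 0 bz bp 0 (by omega)
    rw [Nat.cast_zero] at h
    exact h
  | succ n ih =>
    intro data bz bp hk
    have hge : 150 ≤ data.length := by
      by_contra h
      have : data.length / 150 = 0 := Nat.div_eq_of_lt (by omega)
      omega
    have hsplit : data = data.take 150 ++ data.drop 150 := (List.take_append_drop 150 data).symm
    have hlen150 : (data.take 150).length = 150 := by simp [hge]
    have hne : data.take 150 ≠ [] := by
      intro hnil; rw [hnil] at hlen150; simp at hlen150
    have hdrop : (data.drop 150).length / 150 = n := by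
      have : (data.drop 150).length = data.length - 150 := by simp
      rw [this]
      omega
    conv_lhs => rw [hsplit]
    rw [List.foldl_append]
    rw [show ((0 : Int), (0 : Int), (0 : Int), (0 : Int), bz, bp)
        = ((0 : Int), (0 : Int), (0 : Int), ((0 : Nat) : Int), bz, bp) by norm_num]
    rw [fold_chunk (data.take 150) 0 0 0 bz bp 0 hne (by omega)]
    have hupd : (if (0 : Int) + ((data.take 150).count 0 : Int) < bz
        then ((0 : Int), (0 : Int), (0 : Int), (0 : Int), (0 : Int) + ((data.take 150).count 0 : Int),
          ((0 : Int) + ((data.take 150).count 1 : Int)) * ((0 : Int) + ((data.take 150).count 2 : Int)))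
        else ((0 : Int), (0 : Int), (0 : Int), (0 : Int), bz, bp))
        = ((0 : Int), (0 : Int), (0 : Int), (0 : Int), (updB (bz, bp) (data.take 150)).1,
            (updB (bz, bp) (data.take 150)).2) := by
      unfold updB
      simp only [zero_add]
      split_ifs <;> rfl
    rw [hupd, ih (data.drop 150) _ _ hdrop]
    rw [List.range_succ_eq_map]
    rw [List.foldl_cons, List.foldl_map]
    have hl0 : layer data 0 = data.take 150 := layer_zero data hge
    rw [hl0]
    have hfun : (fun (b : Int × Int) (m : Nat) => updB b (layer (data.drop 150) m))
        = (fun (b : Int × Int) (m : Nat) => updB b (layer data (Nat.succ m))) := by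
      funext b m
      rw [show Nat.succ m = m + 1 from rfl, ← layer_drop data m]
    rw [hfun]

-- correspondence between A's (leastC, leastN) fold and B's (best_zeros, best_product) fold
lemma AB_inv (data : List Int) (k : Nat) :
    (foldA data k).1 = ((List.range k).foldl (fun b m => updB b (layer data m)) (150, 0)).1 ∧
    (((foldA data k).2 = -1 ∧
        ((List.range k).foldl (fun b m => updB b (layer data m)) (150, 0)).2 = 0) ∨
      ∃ m : Nat, (foldA data k).2 = (m : Int) ∧
        ((List.range k).foldl (fun b m => updB b (layer data m)) (150, 0))
          = (zc data m 0, zc data m 1 * zc data m 2)) := by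
  induction k with
  | zero => exact ⟨rfl, Or.inl ⟨rfl, rfl⟩⟩
  | succ n ih =>
    obtain ⟨h1, h2⟩ := ih
    have hA : foldA data (n + 1) = stepA data (foldA data n) (n : Int) := by
      simp [foldA, List.range_succ]
    have hB : (List.range (n + 1)).foldl (fun b m => updB b (layer data m)) (150, 0)
        = updB ((List.range n).foldl (fun b m => updB b (layer data m)) (150, 0)) (layer data n) := by
      simp [List.range_succ]
    rw [hA, hB]
    have hc : count (n : Int) 150 0 data = zc data n 0 := count_natCast data n 0
    set L := (List.range n).foldl (fun b m => updB b (layer data m)) (150, 0) with hL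
    unfold stepA updB
    rw [hc, h1]
    by_cases hlt : ((layer data n).count 0 : Int) < L.1
    · refine ⟨?_, Or.inr ⟨n, ?_, ?_⟩⟩ <;> simp [hlt, zc]
    · refine ⟨?_, ?_⟩
      · simp [hlt, zc, h1]
      · rcases h2 with ⟨ha, hb⟩ | ⟨m, ha, hb⟩
        · exact Or.inl ⟨by simp [hlt, ha, zc], by simp [hlt, hb]⟩
        · refine Or.inr ⟨m, by simp [hlt, ha, zc], ?_⟩
          have hlt' : ¬ List.count 0 (layer data n) < List.count 0 (layer data m) := by
            rw [hb] at hlt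
            simp only [zc] at hlt
            exact fun hc2 => hlt (by exact_mod_cast hc2)
          simp [hlt', hb, zc]

lemma final_eq (data : List Int) : solve data = solve_alt data := by
  rw [solveA_eq, solve_alt_eq]
  have hfd := fold_data (data.length / 150) data 150 0 rfl
  have hbp : (data.foldl stepB (0, 0, 0, 0, 150, 0)).2.2.2.2.2
      = ((List.range (data.length / 150)).foldl
          (fun b m => updB b (layer data m)) (150, 0)).2 := by
    rw [← hfd]
  rw [hbp]
  rcases (AB_inv data (data.length / 150)).2 with ⟨ha, hb⟩ | ⟨m, ha, hb⟩
  · rw [ha, hb, count_neg_one, count_neg_one]; ring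
  · rw [ha, hb, count_natCast, count_natCast]

-- ===== VERDICT (by name: the statement is the Claim_ definition above) =====
theorem solve_spec : Claim_equal_solve := by
  intro data _
  unfold Spec_solve
  exact final_eq data
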